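-- pv_equiv track=rewrite | github.com/Taxiozaurus/randomCodeSnippets | minInMatrix.py | findMinHor
-- ===== SOURCE A (Python) =====
-- MAX_INT = 999999999
--
-- def findMinHor(arr, row):
-- 	minValue = MAX_INT
-- 	valueIndex = 0
-- 	for idx in range(0, len(arr[row])):
-- 		if minValue > arr[row][idx] and arr[row][idx] > 0:
-- 			minValue = arr[row][idx]
-- 			valueIndex = idx
-- 	return [valueIndex, minValue]
-- ===== SOURCE B (Python) =====
-- MAX_INT = 999999999
--
-- def findMinHor(arr, row):
--     positives = [v for v in arr[row] if 0 < v < MAX_INT]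
--     if not positives:
--         return [0, MAX_INT]
--     m = min(positives)
--     return [arr[row].index(m), m]
-- ===== Notes on version B (the rewrite author's own statement) =====
-- stated objective: alternative
-- what changed: Replaces the fused min-and-index scan with a two-phase pass: filter the positive values, take their min, then locate its first index with list.index.
import Mathlib
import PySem

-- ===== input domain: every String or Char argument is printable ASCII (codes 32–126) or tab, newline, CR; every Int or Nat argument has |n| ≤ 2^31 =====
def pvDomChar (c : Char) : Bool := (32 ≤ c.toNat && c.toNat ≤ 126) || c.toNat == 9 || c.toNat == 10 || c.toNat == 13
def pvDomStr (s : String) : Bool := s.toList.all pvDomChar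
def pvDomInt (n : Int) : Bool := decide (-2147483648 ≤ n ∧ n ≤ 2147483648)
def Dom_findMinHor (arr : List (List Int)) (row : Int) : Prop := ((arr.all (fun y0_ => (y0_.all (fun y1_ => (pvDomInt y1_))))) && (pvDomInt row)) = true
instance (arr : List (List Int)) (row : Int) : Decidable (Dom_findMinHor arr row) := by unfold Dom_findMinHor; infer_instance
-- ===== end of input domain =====

-- B replaces A's fused min-and-index scan by a two-phase pass (filter positives, take min, locate its
-- first index); equal return values are proved on all rows that exist (Pre_ excludes the IndexError case).

-- ===== PORT A =====
def findMinHor (arr : List (List Int)) (row : Int) : List Int :=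
  let r := (PySem.List.pyGet? arr row).getD []
  let st := (PySem.List.pyRange 0 (r.length : Int) 1).foldl
    (fun (p : Int × Int) idx =>
      let v := PySem.List.pyGetD r idx 0
      if p.1 > v ∧ v > 0 then (v, idx) else p)
    (999999999, 0)
  [st.2, st.1]

-- ===== PORT B =====
def findMinHor_alt (arr : List (List Int)) (row : Int) : List Int :=
  let r := (PySem.List.pyGet? arr row).getD []
  let positives := r.filter (fun v => decide (0 < v) && decide (v < 999999999))
  match PySem.List.min? positives (fun v => v) with
  | none => [0, 999999999]
  | some m => [(((PySem.List.index? r m).getD 0 : Nat) : Int), m]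

-- ===== PRECONDITION & SPEC =====
-- A (and B) raise IndexError on arr[row] when row is out of range; exactly those inputs are excluded.
def Pre_findMinHor (arr : List (List Int)) (row : Int) : Prop :=
  PySem.Raise.InRange arr.length row
instance (arr : List (List Int)) (row : Int) : Decidable (Pre_findMinHor arr row) := by
  unfold Pre_findMinHor; infer_instance
def pvWitness_findMinHor : List (List Int) × Int := ([[3, 1, 2]], 0)

def Spec_findMinHor (arr : List (List Int)) (row : Int) (out : List Int) : Prop := out = findMinHor_alt arr row
instance (arr : List (List Int)) (row : Int) (out : List Int) : Decidable (Spec_findMinHor arr row out) := by unfold Spec_findMinHor; infer_instance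

-- ===== CLAIM (what is proved, stated in full; the proofs are below) =====
def Claim_equal_findMinHor : Prop := ∀ (arr : List (List Int)) (row : Int), Dom_findMinHor arr row → Pre_findMinHor arr row → Spec_findMinHor arr row (findMinHor arr row)

-- ===== LEMMAS AND PROOFS =====

/-- A's loop as a function of the row. -/
def loopA (r : List Int) : Int × Int :=
  (PySem.List.pyRange 0 (r.length : Int) 1).foldl
    (fun (p : Int × Int) idx =>
      let v := PySem.List.pyGetD r idx 0
      if p.1 > v ∧ v > 0 then (v, idx) else p)
    (999999999, 0)

theorem loopA_append (r : List Int) (x : Int) :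
    loopA (r ++ [x]) =
      (if (loopA r).1 > x ∧ x > 0 then (x, (r.length : Int)) else loopA r) := by
  unfold loopA
  have hlen : ((r ++ [x]).length : Int) = (r.length : Int) + 1 := by
    simp
  rw [hlen, PySem.List.pyRange_one_succ_right (by positivity), List.foldl_append]
  have hcongr :
      (PySem.List.pyRange 0 (r.length : Int) 1).foldl
        (fun (p : Int × Int) idx =>
          let v := PySem.List.pyGetD (r ++ [x]) idx 0
          if p.1 > v ∧ v > 0 then (v, idx) else p) (999999999, 0)
      = (PySem.List.pyRange 0 (r.length : Int) 1).foldl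
        (fun (p : Int × Int) idx =>
          let v := PySem.List.pyGetD r idx 0
          if p.1 > v ∧ v > 0 then (v, idx) else p) (999999999, 0) := by
    apply List.foldl_ext
    intro p idx hmem
    have hb := (PySem.List.mem_pyRange_one).1 hmem
    have hget : PySem.List.pyGetD (r ++ [x]) idx 0 = PySem.List.pyGetD r idx 0 := by
      rw [PySem.List.pyGetD_of_nonneg _ 0 hb.1, PySem.List.pyGetD_of_nonneg _ 0 hb.1]
      have hlt : idx.toNat < r.length := by omega
      simp [List.getD, List.getElem?_append_left hlt]
    simp only [hget]
  rw [hcongr]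
  have hx : PySem.List.pyGetD (r ++ [x]) (r.length : Int) 0 = x := by
    simp [PySem.List.pyGetD]
  simp only [List.foldl_cons, List.foldl_nil, hx]

/-- Characterisation of A's loop as B's two-phase computation. -/
theorem loopA_char (r : List Int) :
    loopA r =
      match PySem.List.min? (r.filter (fun v => decide (0 < v) && decide (v < 999999999))) (fun v => v) with
      | none => ((999999999 : Int), (0 : Int))
      | some m => (m, (((PySem.List.index? r m).getD 0 : Nat) : Int)) := by
  induction r using List.reverseRecOn with
  | nil =>
      simp [loopA, PySem.List.pyRange_one_eq_nil, PySem.List.min?]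
  | append_singleton r x ih =>
      rw [loopA_append, ih]
      have hfilter : (r ++ [x]).filter (fun v => decide (0 < v) && decide (v < 999999999))
          = r.filter (fun v => decide (0 < v) && decide (v < 999999999))
            ++ (if 0 < x ∧ x < 999999999 then [x] else []) := by
        rw [List.filter_append]
        by_cases hx : 0 < x ∧ x < 999999999
        · simp [hx.1, hx.2]
        · rcases (not_and_or.1 hx) with h | h <;> simp [List.filter, h]
      set P := r.filter (fun v => decide (0 < v) && decide (v < 999999999)) with hP
      have hmemP : ∀ v, v ∈ P ↔ v ∈ r ∧ (0 < v ∧ v < 999999999) := by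
        intro v; rw [hP]; simp [List.mem_filter]
      cases hmin : PySem.List.min? P (fun v => v) with
      | none =>
          have hPnil : P = [] := (PySem.List.min?_eq_none_iff _ _).1 hmin
          by_cases hx : 0 < x ∧ x < 999999999
          · -- x is eligible and becomes the unique positive
            have hxnotr : x ∉ r := by
              intro hxr
              have : x ∈ P := (hmemP x).2 ⟨hxr, hx⟩
              simp [hPnil] at this
            have hcond : ((999999999 : Int) > x ∧ x > 0) := ⟨hx.2, hx.1⟩
            rw [if_pos hcond, hfilter, hPnil, if_pos hx]
            have hidx : PySem.List.index? (r ++ [x]) x = some r.length :=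
              PySem.List.index?_append_singleton_self r x hxnotr
            simp only [PySem.List.index?_eq_idxOf?] at hidx
            simp [PySem.List.min?, hidx]
          · have hcond : ¬ ((999999999 : Int) > x ∧ x > 0) := by
              intro h; exact hx ⟨h.2, h.1⟩
            rw [if_neg hcond, hfilter, hPnil, if_neg hx]
            simp [PySem.List.min?]
      | some m =>
          have hmem : m ∈ P := PySem.List.min?_mem hmin
          have hmMin : ∀ y ∈ P, m ≤ y := by
            intro y hy; exact PySem.List.min?_isMin hmin y hy
          have hmr : m ∈ r ∧ (0 < m ∧ m < 999999999) := (hmemP m).1 hmem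
          -- compute min? of P ++ l for the two appended forms
          obtain ⟨p0, t, hPcons⟩ : ∃ p0 t, P = p0 :: t := by
            cases hQ : P with
            | nil => rw [hQ] at hmem; simp at hmem
            | cons a b => exact ⟨a, b, rfl⟩
          have hfold : t.foldl min p0 = m := by
            have h2 := hmin
            rw [hPcons, PySem.List.min?_id_cons] at h2
            exact Option.some.inj h2
          by_cases hcond : m > x ∧ x > 0
          · -- new strict minimum x at index r.length
            have hx : 0 < x ∧ x < 999999999 := ⟨hcond.2, lt_trans hcond.1 hmr.2.2⟩
            have hxnotr : x ∉ r := by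
              intro hxr
              have hxP : x ∈ P := (hmemP x).2 ⟨hxr, hx⟩
              exact absurd (hmMin x hxP) (not_le.2 hcond.1)
            rw [if_pos hcond, hfilter, if_pos hx, hPcons]
            have : PySem.List.min? ((p0 :: t) ++ [x]) (fun v => v) = some (min m x) := by
              rw [List.cons_append, PySem.List.min?_id_cons, List.foldl_append, hfold]
              simp
            rw [this, min_eq_right (le_of_lt hcond.1)]
            have hidx : PySem.List.index? (r ++ [x]) x = some r.length :=
              PySem.List.index?_append_singleton_self r x hxnotr
            simp only [PySem.List.index?_eq_idxOf?] at hidx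
            simp [hidx]
          · -- minimum unchanged
            rw [if_neg hcond, hfilter]
            have hidx : PySem.List.index? (r ++ [x]) m = PySem.List.index? r m :=
              PySem.List.index?_append_of_mem [x] hmr.1
            simp only [PySem.List.index?_eq_idxOf?] at hidx
            by_cases hx : 0 < x ∧ x < 999999999
            · have hmx : m ≤ x := by
                rcases not_and_or.1 hcond with h | h
                · exact le_of_not_gt h
                · exact absurd hx.1 h
              rw [if_pos hx, hPcons]
              have : PySem.List.min? ((p0 :: t) ++ [x]) (fun v => v) = some (min m x) := by
                rw [List.cons_append, PySem.List.min?_id_cons, List.foldl_append, hfold]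
                simp
              rw [this, min_eq_left hmx]
              simp [hidx]
            · rw [if_neg hx, List.append_nil, hmin]
              simp [hidx]

-- ===== VERDICT (by name: the statement is the Claim_ definition above) =====
theorem findMinHor_spec : Claim_equal_findMinHor := by
  intro arr row _ _
  show [(loopA ((PySem.List.pyGet? arr row).getD [])).2,
        (loopA ((PySem.List.pyGet? arr row).getD [])).1] = findMinHor_alt arr row
  rw [loopA_char]
  unfold findMinHor_alt
  cases hm : PySem.List.min? (((PySem.List.pyGet? arr row).getD []).filter
      (fun v => decide (0 < v) && decide (v < 999999999))) (fun v => v) <;> simp [hm]
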